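-- pv_equiv track=rewrite | github.com/mannke55555/final_drill3 | ej.py | separar_magos_cientificos
-- ===== SOURCE A (Python) =====
-- def separar_magos_cientificos(lista):
--     magos = []
--     cientificos = []
--     otros = []
--
--     for lista in lista:
--         if lista in ["Harry Houdini", "David Blaine", "Teller"]:
--             magos.append(lista)
--         elif lista in ["Newton", "Hawking", "Einstein"]:
--             cientificos.append(lista)
--         else:
--             otros.append(lista)
--
--     return magos, cientificos, otros
-- ===== SOURCE B (Python) =====
-- MAGOS = {"Harry Houdini", "David Blaine", "Teller"}
-- CIENTIFICOS = {"Newton", "Hawking", "Einstein"}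
--
-- def separar_magos_cientificos(lista):
--     magos = [x for x in lista if x in MAGOS]
--     cientificos = [x for x in lista if x in CIENTIFICOS]
--     otros = [x for x in lista if x not in MAGOS and x not in CIENTIFICOS]
--     return magos, cientificos, otros
-- ===== Notes on version B (the rewrite author's own statement) =====
-- stated objective: idiomatic
-- what changed: Replaces the single classifying loop with three mutable accumulators by three independent membership-filter comprehensions over the input, one per result list.
import Mathlib
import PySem

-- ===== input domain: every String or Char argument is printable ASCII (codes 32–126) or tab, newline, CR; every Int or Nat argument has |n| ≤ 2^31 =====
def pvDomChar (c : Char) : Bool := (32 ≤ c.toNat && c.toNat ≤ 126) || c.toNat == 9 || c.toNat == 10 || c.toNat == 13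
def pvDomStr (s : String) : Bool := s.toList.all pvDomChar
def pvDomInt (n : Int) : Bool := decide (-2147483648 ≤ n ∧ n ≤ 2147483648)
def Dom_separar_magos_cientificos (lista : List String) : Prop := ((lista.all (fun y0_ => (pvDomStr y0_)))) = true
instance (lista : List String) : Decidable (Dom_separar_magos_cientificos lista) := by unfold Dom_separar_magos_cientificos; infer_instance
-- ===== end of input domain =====

-- B replaces A's single classifying loop with three mutable accumulators by three
-- independent set-membership filter passes, one per result list (idiomatic decomposition).


-- ===== PORT A =====
-- A: one pass over the list, appending each element to one of three accumulators.
def separar_magos_cientificos (lista : List String) : List String × List String × List String :=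
  lista.foldl (fun (acc : List String × List String × List String) x =>
    let (magos, cientificos, otros) := acc
    if x = "Harry Houdini" ∨ x = "David Blaine" ∨ x = "Teller" then
      (magos ++ [x], cientificos, otros)
    else if x = "Newton" ∨ x = "Hawking" ∨ x = "Einstein" then
      (magos, cientificos ++ [x], otros)
    else
      (magos, cientificos, otros ++ [x])) ([], [], [])

-- ===== PORT B =====
def pvMagos : PySem.Set String := PySem.Set.ofList ["Harry Houdini", "David Blaine", "Teller"]
def pvCientificos : PySem.Set String := PySem.Set.ofList ["Newton", "Hawking", "Einstein"]

def separar_magos_cientificos_alt (lista : List String) : List String × List String × List String :=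
  (lista.filter (fun x => PySem.Set.contains pvMagos x),
   lista.filter (fun x => PySem.Set.contains pvCientificos x),
   lista.filter (fun x => !PySem.Set.contains pvMagos x && !PySem.Set.contains pvCientificos x))

-- ===== PRECONDITION & SPEC =====
def Spec_separar_magos_cientificos (lista : List String) (out : List String × List String × List String) : Prop := out = separar_magos_cientificos_alt lista
instance (lista : List String) (out : List String × List String × List String) : Decidable (Spec_separar_magos_cientificos lista out) := by unfold Spec_separar_magos_cientificos; infer_instance

-- ===== CLAIM (what is proved, stated in full; the proofs are below) =====
def Claim_equal_separar_magos_cientificos : Prop := ∀ (lista : List String), Dom_separar_magos_cientificos lista → Spec_separar_magos_cientificos lista (separar_magos_cientificos lista)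

-- ===== LEMMAS AND PROOFS =====

theorem pv_mem_magos (x : String) :
    x ∈ (pvMagos : List String) ↔ (x = "Harry Houdini" ∨ x = "David Blaine" ∨ x = "Teller") := by
  have h : (pvMagos : List String) = ["Harry Houdini", "David Blaine", "Teller"] := by decide
  rw [h]; simp

theorem pv_mem_cientificos (x : String) :
    x ∈ (pvCientificos : List String) ↔ (x = "Newton" ∨ x = "Hawking" ∨ x = "Einstein") := by
  have h : (pvCientificos : List String) = ["Newton", "Hawking", "Einstein"] := by decide
  rw [h]; simp

theorem pv_foldl_partition (lista m c o : List String) :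
    lista.foldl (fun (acc : List String × List String × List String) x =>
      let (magos, cientificos, otros) := acc
      if x = "Harry Houdini" ∨ x = "David Blaine" ∨ x = "Teller" then
        (magos ++ [x], cientificos, otros)
      else if x = "Newton" ∨ x = "Hawking" ∨ x = "Einstein" then
        (magos, cientificos ++ [x], otros)
      else
        (magos, cientificos, otros ++ [x])) (m, c, o)
    = (m ++ lista.filter (fun x => PySem.Set.contains pvMagos x),
       c ++ lista.filter (fun x => PySem.Set.contains pvCientificos x),
       o ++ lista.filter (fun x => !PySem.Set.contains pvMagos x && !PySem.Set.contains pvCientificos x)) := by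
  induction lista generalizing m c o with
  | nil => simp
  | cons hd tl ih =>
    simp only [List.foldl_cons, List.filter_cons]
    by_cases h1 : hd = "Harry Houdini" ∨ hd = "David Blaine" ∨ hd = "Teller"
    · have h2 : ¬ (hd = "Newton" ∨ hd = "Hawking" ∨ hd = "Einstein") := by
        rcases h1 with h | h | h <;> subst h <;> decide
      simp [h1, h2, ih, pv_mem_magos, pv_mem_cientificos]
    · by_cases h2 : hd = "Newton" ∨ hd = "Hawking" ∨ hd = "Einstein"
      · simp [h1, h2, ih, pv_mem_magos, pv_mem_cientificos]
      · simp [h1, h2, ih, pv_mem_magos, pv_mem_cientificos]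

-- ===== VERDICT (by name: the statement is the Claim_ definition above) =====
theorem separar_magos_cientificos_spec : Claim_equal_separar_magos_cientificos := by
  intro lista _
  unfold Spec_separar_magos_cientificos separar_magos_cientificos separar_magos_cientificos_alt
  simpa using pv_foldl_partition lista [] [] []
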